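-- pv_equiv track=rewrite | github.com/gmike07/huji | intro-67101/ex6/wave_editor.py | meets_composition_requirements
-- ===== SOURCE A (Python) =====
-- COMPOSITION_INPUTS = {"A", "B", "C", "D", "E", "F", "G", "Q"}
--
-- def meets_composition_requirements(user_input):
--     """
--     :param user_input: gets a list of strings
--     :return: true if the input is a composition, else false
--     """
--     if len(user_input) % 2 != 0:
--         return False
--     # if the strings are not a subset of the options
--     # then it is not a valid input
--     if not set(user_input[::2]) <= COMPOSITION_INPUTS:
--         return False
--     # return set(''.join(user_input[1::2]) <= set("0123456789")}
--     for i in range(1, len(user_input), 2):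
--         if not is_number(user_input[i]):
--             return False
--     return True
--
-- def is_number(string):
--     """
--     :param string: gets a string
--     :return: returns true if the string can be converted into int, else false
--     """
--     for letter in string:
--         if not letter.isdigit():
--             return False
--     return True
-- ===== SOURCE B (Python) =====
-- COMPOSITION_INPUTS = {"A", "B", "C", "D", "E", "F", "G", "Q"}
--
-- def meets_composition_requirements(user_input):
--     if len(user_input) % 2 != 0:
--         return False
--     it = iter(user_input)
--     for label in it:
--         count = next(it)
--         if label not in COMPOSITION_INPUTS:
--             return False
--         if not all(c.isdigit() for c in count):
--             return False
--     return True
-- ===== Notes on version B (the rewrite author's own statement) =====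
-- stated objective: simpler
-- what changed: Replaced A's slice-based set-subset test plus a separate odd-index loop with a single pair-consuming pass that checks each (label, count) pair as it goes.
import Mathlib
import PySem

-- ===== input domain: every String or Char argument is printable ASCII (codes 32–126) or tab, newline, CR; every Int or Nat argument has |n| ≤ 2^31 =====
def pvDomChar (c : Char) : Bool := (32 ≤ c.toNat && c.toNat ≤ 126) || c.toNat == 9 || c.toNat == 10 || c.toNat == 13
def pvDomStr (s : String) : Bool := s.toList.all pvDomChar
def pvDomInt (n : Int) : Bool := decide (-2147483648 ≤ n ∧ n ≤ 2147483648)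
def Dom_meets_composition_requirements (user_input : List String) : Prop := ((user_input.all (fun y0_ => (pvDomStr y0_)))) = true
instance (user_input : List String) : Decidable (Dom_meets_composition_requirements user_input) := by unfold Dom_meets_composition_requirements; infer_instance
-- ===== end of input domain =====

-- B replaces A's slice-based subset test plus separate odd-index loop with one pair-consuming pass (objective: simpler, one traversal).

-- ===== PORT A =====
def COMPOSITION_INPUTS : PySem.Set String :=
  PySem.Set.ofList ["A", "B", "C", "D", "E", "F", "G", "Q"]

def is_number (string : String) : Bool :=
  string.toList.all (fun letter => PySem.Chars.isdigit letter)

def meets_composition_requirements (user_input : List String) : Bool :=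
  if user_input.length % 2 ≠ 0 then false
  else if ¬ (PySem.Set.issubset
        (PySem.Set.ofList ((PySem.List.slice? user_input none none 2).getD []))
        COMPOSITION_INPUTS) then false
  else (PySem.List.pyRange 1 user_input.length 2).all
        (fun i => is_number (PySem.List.pyGetD user_input i ""))

-- ===== PORT B =====
-- B's loop consumes the list two tokens at a time; the singleton case is unreachable behind the even-length guard.
def pairLoop : List String → Bool
  | [] => true
  | [_] => false
  | label :: count :: rest =>
    if ¬ (PySem.Set.contains COMPOSITION_INPUTS label) then false
    else if ¬ (count.toList.all (fun c => PySem.Chars.isdigit c)) then false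
    else pairLoop rest

def meets_composition_requirements_alt (user_input : List String) : Bool :=
  if user_input.length % 2 ≠ 0 then false
  else pairLoop user_input

-- ===== PRECONDITION & SPEC =====
def Spec_meets_composition_requirements (user_input : List String) (out : Bool) : Prop := out = meets_composition_requirements_alt user_input
instance (user_input : List String) (out : Bool) : Decidable (Spec_meets_composition_requirements user_input out) := by unfold Spec_meets_composition_requirements; infer_instance

-- ===== CLAIM (what is proved, stated in full; the proofs are below) =====
def Claim_equal_meets_composition_requirements : Prop := ∀ (user_input : List String), Dom_meets_composition_requirements user_input → Spec_meets_composition_requirements user_input (meets_composition_requirements user_input)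

-- ===== LEMMAS AND PROOFS =====

/-- The even-position elements of a list (what `xs[::2]` collects). -/
def evens {α : Type} : List α → List α
  | [] => []
  | [a] => [a]
  | a :: _ :: t => a :: evens t

/-- The odd-position elements of a list. -/
def odds {α : Type} : List α → List α
  | [] => []
  | [_] => []
  | _ :: b :: t => b :: odds t

theorem filterMap_evens {α : Type} (xs : List α) :
    List.filterMap (fun k : Nat => xs[2 * k]?) (List.range ((xs.length + 1) / 2)) = evens xs := by
  induction xs using evens.induct with
  | case1 => simp [evens]
  | case2 a => simp [evens]
  | case3 a b t ih =>
    have hc : ((a :: b :: t).length + 1) / 2 = (t.length + 1) / 2 + 1 := by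
      simp; omega
    rw [hc, List.range_succ_eq_map, List.filterMap_cons, List.filterMap_map]
    simp only [Nat.mul_zero, List.getElem?_cons_zero]
    have : (fun k : Nat => (a :: b :: t)[2 * (k + 1)]?) = (fun k : Nat => t[2 * k]?) := by
      funext k
      have h2 : 2 * (k + 1) = 2 * k + 2 := by omega
      rw [h2]
      rfl
    simp only [Function.comp_def, Nat.succ_eq_add_one, this, ih, evens]

theorem slice2_eq_evens {α : Type} (xs : List α) :
    (PySem.List.slice? xs none none 2).getD [] = evens xs := by
  rw [show (PySem.List.slice? xs none none 2) = some (List.filterMap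
      (fun k : Nat => xs[(0 + 2 * (k : Int)).toNat]?)
      (List.range (if (0:Int) < (xs.length:Int) then (((xs.length:Int) - 0 + 2 - 1) / 2).toNat else 0)))
    from rfl]
  rw [Option.getD_some]
  rw [← filterMap_evens xs]
  congr 1
  · funext k
    congr 1
    omega
  · congr 1
    rcases Nat.eq_zero_or_pos xs.length with h | h
    · simp [h]
    · rw [if_pos (by exact_mod_cast h)]
      omega

theorem range_odds {α : Type} (p : α → Bool) (d : α) (xs : List α) :
    (List.range (xs.length / 2)).all (fun k => p (xs.getD (2 * k + 1) d)) = (odds xs).all p := by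
  induction xs using odds.induct with
  | case1 => simp [odds]
  | case2 a => simp [odds]
  | case3 a b t ih =>
    have hc : (a :: b :: t).length / 2 = t.length / 2 + 1 := by simp; omega
    rw [hc, List.range_succ_eq_map, List.all_cons, List.all_map]
    have h0 : (a :: b :: t).getD (2 * 0 + 1) d = b := rfl
    have : (fun k : Nat => p ((a :: b :: t).getD (2 * (k + 1) + 1) d)) =
        (fun k : Nat => p (t.getD (2 * k + 1) d)) := by
      funext k
      have h2 : 2 * (k + 1) + 1 = 2 * k + 1 + 2 := by omega
      rw [h2]
      rfl
    simp only [h0, Function.comp_def, Nat.succ_eq_add_one, this, ih, odds, List.all_cons]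

theorem all_range_congr (n : Nat) (p q : Nat → Bool) (h : ∀ k ∈ List.range n, p k = q k) :
    (List.range n).all p = (List.range n).all q := by
  induction n with
  | zero => rfl
  | succ n ih =>
    rw [List.range_succ, List.all_append, List.all_append,
      ih (fun k hk => h k (by simp at hk ⊢; omega))]
    simp only [List.all_cons, List.all_nil]
    rw [h n (by simp)]

theorem pyRange_odd_all (xs : List String) :
    ((PySem.List.pyRange 1 (xs.length) 2).all
        (fun i => is_number (PySem.List.pyGetD xs i ""))) = (odds xs).all is_number := by
  rw [PySem.List.pyRange_of_pos 1 (xs.length) (by norm_num), List.all_map]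
  rw [← range_odds is_number "" xs]
  have hcount : (if (1:Int) < (xs.length:Int) then (((xs.length:Int) - 1 + 2 - 1) / 2).toNat else 0)
      = xs.length / 2 := by
    rcases Nat.lt_or_ge 1 xs.length with h | h
    · have h' : (1:Int) < (xs.length:Int) := by exact_mod_cast h
      rw [if_pos h']; omega
    · have h' : (xs.length:Int) ≤ 1 := by exact_mod_cast h
      rw [if_neg (by omega)]; omega
  rw [hcount]
  refine all_range_congr _ _ _ ?_
  intro k hk
  have hidx : PySem.List.pyGetD xs (1 + 2 * (k:Int)) "" = xs.getD (2 * k + 1) "" := by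
    rw [show ((1:Int) + 2 * (k:Int)) = ((2 * k + 1 : Nat) : Int) from by push_cast; ring]
    rw [PySem.List.pyGetD_natCast]
  show is_number (PySem.List.pyGetD xs (1 + 2 * (k:Int)) "") = _
  rw [hidx]

theorem pairLoop_eq (xs : List String) (h : xs.length % 2 = 0) :
    pairLoop xs = ((evens xs).all (fun s => PySem.Set.contains COMPOSITION_INPUTS s)
      && (odds xs).all is_number) := by
  induction xs using evens.induct with
  | case1 => simp [pairLoop, evens, odds]
  | case2 a => simp at h
  | case3 a b t ih =>
    have ht : t.length % 2 = 0 := by simp at h; omega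
    simp only [pairLoop, evens, odds, List.all_cons]
    rw [ih ht]
    cases hca : PySem.Set.contains COMPOSITION_INPUTS a
    · simp
    · cases hdb : b.toList.all (fun c => PySem.Chars.isdigit c)
      · simp [hdb, is_number]
      · simp [hdb, is_number]

theorem subset_eq_all (xs : List String) :
    PySem.Set.issubset (PySem.Set.ofList xs) COMPOSITION_INPUTS
      = xs.all (fun s => PySem.Set.contains COMPOSITION_INPUTS s) := by
  rcases hb : xs.all (fun s => PySem.Set.contains COMPOSITION_INPUTS s) with _ | _
  · rw [Bool.eq_false_iff]
    intro hsub
    rw [List.all_eq_false] at hb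
    obtain ⟨x, hx, hcx⟩ := hb
    have := (PySem.Set.issubset_iff _ _).mp hsub x ((PySem.Set.mem_ofList _ _).mpr hx)
    exact absurd ((PySem.Set.contains_iff _ _).mpr this) (by simpa using hcx)
  · refine (PySem.Set.issubset_iff _ _).mpr ?_
    intro x hx
    rw [List.all_eq_true] at hb
    exact (PySem.Set.contains_iff _ _).mp (by simpa using hb x ((PySem.Set.mem_ofList _ _).mp hx))

-- ===== VERDICT (by name: the statement is the Claim_ definition above) =====
theorem meets_composition_requirements_spec : Claim_equal_meets_composition_requirements := by
  intro xs _
  show meets_composition_requirements xs = meets_composition_requirements_alt xs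
  unfold meets_composition_requirements meets_composition_requirements_alt
  rw [slice2_eq_evens, subset_eq_all, pyRange_odd_all]
  by_cases hpar : xs.length % 2 = 0
  · have h00 : ¬((0:Nat) ≠ 0) := by omega
    rw [pairLoop_eq xs hpar, hpar, if_neg h00, if_neg h00]
    cases hsub : (evens xs).all (fun s => PySem.Set.contains COMPOSITION_INPUTS s)
    · simp
    · simp
  · rw [if_pos hpar, if_pos hpar]
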